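-- pv_equiv track=rewrite | github.com/HasunSong/youtube_web_scraper | youtube.py | cut_view
-- ===== SOURCE A (Python) =====
-- def cut_view(s):
--     l=len(s)
--     init=0
--     fin=l
--     for i in range(l):
--         if s[i] in ('0','1','2','3','4','5','6','7','8','9'):
--             init=i
--             break
--     for j in range(l-1,-1,-1):
--         if s[j] in ('0','1','2','3','4','5','6','7','8','9'):
--             fin=j+1
--             break
--     return s[init:fin]
-- ===== SOURCE B (Python) =====
-- def cut_view(s):
--     pos = [i for i, c in enumerate(s) if c in "0123456789"]
--     return s[pos[0]:pos[-1] + 1] if pos else s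
-- ===== Notes on version B (the rewrite author's own statement) =====
-- stated objective: simpler
-- what changed: A's two index-scanning break loops (forward and backward over range) are replaced by a single comprehension collecting all digit positions, slicing from the first to the last collected position.
import Mathlib
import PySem

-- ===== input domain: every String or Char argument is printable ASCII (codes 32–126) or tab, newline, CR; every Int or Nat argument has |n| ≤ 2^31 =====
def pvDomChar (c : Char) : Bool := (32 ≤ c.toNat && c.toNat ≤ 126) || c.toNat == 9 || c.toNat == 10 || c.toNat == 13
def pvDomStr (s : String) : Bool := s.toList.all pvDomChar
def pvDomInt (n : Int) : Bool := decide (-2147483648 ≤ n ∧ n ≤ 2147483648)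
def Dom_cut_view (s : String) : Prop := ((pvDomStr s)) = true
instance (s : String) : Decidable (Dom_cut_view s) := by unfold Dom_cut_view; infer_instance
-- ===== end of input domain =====

-- B replaces A's two scan-and-break index loops by one comprehension of all digit
-- positions and a single slice from the first to the last position (objective: simpler).

-- ===== PORT A =====
-- `s[i] in ('0',…,'9')`
def pvDigitsA : List Char := ['0','1','2','3','4','5','6','7','8','9']

-- `for i in range(l): if s[i] in (…): init=i; break` — iterating range(l) and indexing
-- s[i] is iterating enumerate(s); the break-loop is this structural recursion.
def pvFwdLoop (es : List (Int × Char)) (init : Int) : Int :=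
  match es with
  | [] => init
  | (i, c) :: rest => if pvDigitsA.contains c then i else pvFwdLoop rest init

-- `for j in range(l-1,-1,-1): if s[j] in (…): fin=j+1; break` — the same pairs in reverse.
def pvBwdLoop (es : List (Int × Char)) (fin : Int) : Int :=
  match es with
  | [] => fin
  | (j, c) :: rest => if pvDigitsA.contains c then j + 1 else pvBwdLoop rest fin

def cut_view (s : String) : String :=
  let l : Int := s.toList.length
  let init : Int := pvFwdLoop (PySem.List.enumerate s.toList 0) 0
  let fin : Int := pvBwdLoop (PySem.List.enumerate s.toList 0).reverse l
  PySem.Str.slice s (some init) (some fin)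

-- ===== PORT B =====
def cut_view_alt (s : String) : String :=
  -- pos = [i for i, c in enumerate(s) if c in "0123456789"]
  -- (for a single char c, `c in str` is membership of c among the string's chars)
  let pos : List Int :=
    ((PySem.List.enumerate s.toList 0).filter
      (fun p => ("0123456789".toList).contains p.2)).map (·.1)
  match pos with
  | [] => s
  | i :: _ => PySem.Str.slice s (some i) (some (pos.getLastD i + 1))

-- ===== PRECONDITION & SPEC =====
def Spec_cut_view (s : String) (out : String) : Prop := out = cut_view_alt s
instance (s : String) (out : String) : Decidable (Spec_cut_view s out) := by unfold Spec_cut_view; infer_instance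

-- ===== CLAIM (what is proved, stated in full; the proofs are below) =====
def Claim_equal_cut_view : Prop := ∀ (s : String), Dom_cut_view s → Spec_cut_view s (cut_view s)

-- ===== LEMMAS AND PROOFS =====

theorem pvDigits_eq : "0123456789".toList = pvDigitsA := by decide

theorem pvFwdLoop_eq (es : List (Int × Char)) (init : Int) :
    pvFwdLoop es init =
      ((es.filter (fun p => pvDigitsA.contains p.2)).map (·.1)).headD init := by
  induction es with
  | nil => rfl
  | cons p rest ih =>
    obtain ⟨i, c⟩ := p
    by_cases h : c ∈ pvDigitsA
    · simp [pvFwdLoop, h]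
    · simp [pvFwdLoop, h, ih]

theorem pvBwdLoop_eq (es : List (Int × Char)) (fin : Int) :
    pvBwdLoop es fin =
      match (es.filter (fun p => pvDigitsA.contains p.2)).map (·.1) with
      | [] => fin
      | j :: _ => j + 1 := by
  induction es with
  | nil => rfl
  | cons p rest ih =>
    obtain ⟨j, c⟩ := p
    by_cases h : c ∈ pvDigitsA
    · simp [pvBwdLoop, h]
    · simp [pvBwdLoop, h, ih]

-- ===== VERDICT (by name: the statement is the Claim_ definition above) =====
theorem cut_view_spec : Claim_equal_cut_view := by
  intro s _
  unfold Spec_cut_view cut_view cut_view_alt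
  simp only [pvDigits_eq, pvFwdLoop_eq, pvBwdLoop_eq, List.filter_reverse, List.map_reverse]
  set pos := ((PySem.List.enumerate s.toList 0).filter
      (fun p => pvDigitsA.contains p.2)).map (·.1) with hpos
  clear_value pos
  cases hp : pos with
  | nil =>
      simp only [List.headD_nil, List.reverse_nil]
      have h : (PySem.Str.slice s (some 0) (some (s.toList.length : Int))).toList
          = s.toList := by simp [pysem]
      exact String.toList_inj.mp h
  | cons i rest =>
      have hrevne : (i :: rest).reverse ≠ [] := by simp
      rcases List.exists_cons_of_ne_nil hrevne with ⟨j, t, hrev⟩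
      have hj : j = (i :: rest).getLastD i := by
        have h1 : ((i :: rest).reverse).head? = (i :: rest).getLast? :=
          List.head?_reverse
        rw [hrev] at h1
        simp [List.getLastD_eq_getLast?, ← h1]
      simp only [hrev, List.headD_cons, hj]
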